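-- pv_equiv track=rewrite | github.com/millalgo/indexer | home/book_schedule_breakdown.py | reading_schedule
-- ===== SOURCE A (Python) =====
-- def reading_schedule(total_pages, total_days):
--     # Calculate base pages per day and remaining pages
--     base_pages = total_pages // total_days
--     remainder = total_pages % total_days
--
--     schedule = []
--     current_page = 1
--
--     for day in range(1, total_days + 1):
--         # Distribute the remainder pages to the first few days
--         pages_today = base_pages + 1 if day <= remainder else base_pages
--         start_page = current_page
--         end_page = current_page + pages_today - 1
--
--         schedule.append({
--             'Day': day,
--             'Start Page': start_page,
--             'End Page': end_page
--         })
--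
--         current_page = end_page + 1
--
--     return schedule
-- ===== SOURCE B (Python) =====
-- def reading_schedule(total_pages, total_days):
--     base_pages = total_pages // total_days
--     remainder = total_pages % total_days
--     return [
--         {'Day': day,
--          'Start Page': 1 + base_pages * (day - 1) + min(day - 1, remainder),
--          'End Page': base_pages * day + min(day, remainder)}
--         for day in range(1, total_days + 1)
--     ]
-- ===== Notes on version B (the rewrite author's own statement) =====
-- stated objective: alternative
-- what changed: Replaces the accumulator loop carrying current_page with an independent closed-form formula per day (start = 1 + base*(day-1) + min(day-1, remainder)), built as a list comprehension.
import Mathlib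
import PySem

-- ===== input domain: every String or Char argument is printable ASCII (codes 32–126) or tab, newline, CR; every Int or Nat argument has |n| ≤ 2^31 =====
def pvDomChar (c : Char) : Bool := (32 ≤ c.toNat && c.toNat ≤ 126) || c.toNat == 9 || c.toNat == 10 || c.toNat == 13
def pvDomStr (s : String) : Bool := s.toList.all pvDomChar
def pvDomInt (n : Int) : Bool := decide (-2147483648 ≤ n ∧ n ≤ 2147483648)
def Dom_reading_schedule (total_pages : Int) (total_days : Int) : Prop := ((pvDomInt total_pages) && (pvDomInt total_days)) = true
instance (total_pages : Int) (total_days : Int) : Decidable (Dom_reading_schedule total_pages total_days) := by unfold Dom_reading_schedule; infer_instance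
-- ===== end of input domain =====

-- B replaces A's carried current_page accumulator with a per-day closed-form start/end page; same values, alternative decomposition.

-- ===== PORT A =====
def reading_schedule (total_pages : Int) (total_days : Int) : List (List (String × Int)) :=
  let base_pages := PySem.Int.floordiv total_pages total_days
  let remainder := PySem.Int.mod total_pages total_days
  ((PySem.List.pyRange 1 (total_days + 1) 1).foldl
    (fun (st : List (List (String × Int)) × Int) day =>
      let pages_today := if day ≤ remainder then base_pages + 1 else base_pages
      let start_page := st.2
      let end_page := st.2 + pages_today - 1
      (st.1 ++ [[("Day", day), ("Start Page", start_page), ("End Page", end_page)]],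
       end_page + 1))
    ([], 1)).1

-- ===== PORT B =====
def reading_schedule_alt (total_pages : Int) (total_days : Int) : List (List (String × Int)) :=
  let base_pages := PySem.Int.floordiv total_pages total_days
  let remainder := PySem.Int.mod total_pages total_days
  (PySem.List.pyRange 1 (total_days + 1) 1).map
    (fun day =>
      [("Day", day),
       ("Start Page", 1 + base_pages * (day - 1) + min (day - 1) remainder),
       ("End Page", base_pages * day + min day remainder)])

-- ===== PRECONDITION & SPEC =====
-- Pre_ excludes exactly total_days = 0, where Python's '//' and '%' raise ZeroDivisionError.
def Pre_reading_schedule (total_pages : Int) (total_days : Int) : Prop := total_days ≠ 0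
instance (total_pages : Int) (total_days : Int) : Decidable (Pre_reading_schedule total_pages total_days) := by unfold Pre_reading_schedule; infer_instance
def pvWitness_reading_schedule : Int × Int := (7, 3)

def Spec_reading_schedule (total_pages : Int) (total_days : Int) (out : List (List (String × Int))) : Prop := out = reading_schedule_alt total_pages total_days
instance (total_pages : Int) (total_days : Int) (out : List (List (String × Int))) : Decidable (Spec_reading_schedule total_pages total_days out) := by unfold Spec_reading_schedule; infer_instance

-- ===== CLAIM (what is proved, stated in full; the proofs are below) =====
def Claim_equal_reading_schedule : Prop := ∀ (total_pages : Int) (total_days : Int), Dom_reading_schedule total_pages total_days → Pre_reading_schedule total_pages total_days → Spec_reading_schedule total_pages total_days (reading_schedule total_pages total_days)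

-- ===== LEMMAS AND PROOFS =====

-- Loop invariant: after n days, A's fold has produced exactly B's rows for days 1..n,
-- and its carried current_page equals the closed form 1 + base*n + min n r.
lemma fold_closed_form (base r : Int) (hr : 0 ≤ r) (n : Nat) :
    List.foldl
      (fun (st : List (List (String × Int)) × Int) day =>
        (st.1 ++ [[("Day", day), ("Start Page", st.2),
            ("End Page", (st.2 + if day ≤ r then base + 1 else base) - 1)]],
         (st.2 + if day ≤ r then base + 1 else base) - 1 + 1))
      ([], 1) (List.map (fun (k : Nat) => 1 + (k : Int)) (List.range n))
    = (List.map
        (fun day =>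
          [("Day", day),
           ("Start Page", 1 + base * (day - 1) + min (day - 1) r),
           ("End Page", base * day + min day r)])
        (List.map (fun (k : Nat) => 1 + (k : Int)) (List.range n)),
       1 + base * n + min (n : Int) r) := by
  induction n with
  | zero => simp; omega
  | succ n ih =>
    rw [List.range_succ, List.map_append, List.foldl_append, ih, List.map_append]
    simp only [List.map_cons, List.map_nil, List.foldl_cons, List.foldl_nil, Prod.mk.injEq,
      List.append_cancel_left_eq, List.cons.injEq, Prod.mk.injEq, and_true, true_and]
    push_cast
    have e1 : (1:Int) + (n:Int) - 1 = n := by ring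
    have e2 : base * (1 + (n:Int)) = base * n + base := by ring
    have e3 : base * ((n:Int) + 1) = base * n + base := by ring
    rw [e1, e2, e3]
    refine ⟨⟨rfl, ?_⟩, ?_⟩ <;> split_ifs with h <;> omega

-- ===== VERDICT (by name: the statement is the Claim_ definition above) =====
theorem reading_schedule_spec : Claim_equal_reading_schedule := by
  intro tp td _ hpre
  unfold Spec_reading_schedule reading_schedule reading_schedule_alt
  simp only [PySem.List.pyRange_one]
  rcases lt_or_gt_of_ne hpre with hneg | hpos
  · have h1 : (td + 1 - 1).toNat = 0 := by omega
    have h2 : td.toNat = 0 := by omega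
    simp [h2]
  · have hr : 0 ≤ PySem.Int.mod tp td := PySem.Int.mod_nonneg tp hpos
    rw [fold_closed_form _ _ hr]
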